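-- pv_equiv track=rewrite | github.com/igorbock/beginning-python | 02_10_compreensoes_listas_basicas/resumo_elementos_da_liberdade.py | elements_of_freedom
-- ===== SOURCE A (Python) =====
-- def elements_of_freedom(elements):
--     # Your solution here
--     if elements == []:
--         return []
--     # Step 1: Filter elements with length >= 5
--     filtro = [x for x in elements if len(x) >= 5]
--     # Step 2: Convert filtered elements to uppercase
--     upper = [y.upper() for y in filtro]
--     # Step 3: Create a list of unique elements
--     unicos = []
--     uniques = [unicos.append(z) for z in upper if z not in unicos]
--     # Step 4: Return the final result
--     return unicos
-- ===== SOURCE B (Python) =====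
-- def elements_of_freedom(elements):
--     # worklist of (passes length test, uppercased value); dedupe by deleting
--     # future duplicates of each emitted value instead of a seen-set/output scan
--     work = [(len(x) >= 5, x.upper()) for x in elements]
--     result = []
--     i = 0
--     while i < len(work):
--         ok, u = work[i]
--         i += 1
--         if ok:
--             result.append(u)
--             work[i:] = [p for p in work[i:] if p[1] != u]
--     return result
-- ===== Notes on version B (the rewrite author's own statement) =====
-- stated objective: alternative
-- what changed: B keeps no seen-list or set at all: it precomputes (length-ok, uppercased) pairs once, then walks a worklist and, each time it emits a value, deletes every remaining pair that uppercases to it, so duplicates are eliminated ahead in the input instead of checked by membership against the growing output.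
import Mathlib
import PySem

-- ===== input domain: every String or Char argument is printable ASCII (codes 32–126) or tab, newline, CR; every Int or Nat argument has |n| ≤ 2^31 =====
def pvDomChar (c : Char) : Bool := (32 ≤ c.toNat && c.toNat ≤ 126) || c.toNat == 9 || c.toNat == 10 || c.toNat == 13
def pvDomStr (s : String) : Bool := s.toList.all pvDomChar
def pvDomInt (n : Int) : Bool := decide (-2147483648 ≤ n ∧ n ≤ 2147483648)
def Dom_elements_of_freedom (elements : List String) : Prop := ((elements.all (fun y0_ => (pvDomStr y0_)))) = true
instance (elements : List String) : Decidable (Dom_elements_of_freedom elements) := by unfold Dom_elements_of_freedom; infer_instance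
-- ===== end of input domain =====

-- B replaces A's staged filter/map/membership-dedupe by a worklist loop that emits each
-- uppercased value once and deletes its future duplicates from the remaining work; objective: alternative.

-- ===== PORT A =====
def elements_of_freedom (elements : List String) : List String :=
  if elements = [] then []
  else
    let filtro := elements.filter (fun x => 5 ≤ PySem.Str.len x)
    let upper := filtro.map (fun y => PySem.Str.upper y)
    let unicos := upper.foldl (fun acc z => if z ∈ acc then acc else acc ++ [z]) []
    unicos

-- ===== PORT B =====
-- the while loop of Source B: worklist of (length-ok, uppercased) pairs; each emitted value
-- removes its remaining duplicates from the worklist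
def pvBLoop (work : List (Bool × String)) (result : List String) : List String :=
  match work with
  | [] => result
  | p :: rest =>
    if p.1 then pvBLoop (rest.filter (fun q => q.2 ≠ p.2)) (result ++ [p.2])
    else pvBLoop rest result
termination_by work.length
decreasing_by
  · simp; exact le_trans (List.length_filter_le _ _) (by simp)
  · simp

def elements_of_freedom_alt (elements : List String) : List String :=
  pvBLoop (elements.map (fun x => (decide (5 ≤ PySem.Str.len x), PySem.Str.upper x))) []

-- ===== PRECONDITION & SPEC =====
def Spec_elements_of_freedom (elements : List String) (out : List String) : Prop := out = elements_of_freedom_alt elements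
instance (elements : List String) (out : List String) : Decidable (Spec_elements_of_freedom elements out) := by unfold Spec_elements_of_freedom; infer_instance

-- ===== CLAIM (what is proved, stated in full; the proofs are below) =====
def Claim_equal_elements_of_freedom : Prop := ∀ (elements : List String), Dom_elements_of_freedom elements → Spec_elements_of_freedom elements (elements_of_freedom elements)

-- ===== LEMMAS AND PROOFS =====

-- reference form both sides are reduced to: recursive dedupe-by-elimination
def pvDedup (l : List String) : List String :=
  match l with
  | [] => []
  | u :: L => u :: pvDedup (L.filter (fun z => z ≠ u))
termination_by l.length
decreasing_by simp; exact le_trans (List.length_filter_le _ _) (by simp)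

lemma pvDedup_nil : pvDedup [] = [] := by rw [pvDedup]

lemma pvDedup_cons (u : String) (L : List String) :
    pvDedup (u :: L) = u :: pvDedup (L.filter (fun z => z ≠ u)) := by rw [pvDedup]

-- A's foldl dedupe, generalized over the accumulator
lemma pv_foldl_dedup (L : List String) (acc : List String) :
    L.foldl (fun acc z => if z ∈ acc then acc else acc ++ [z]) acc
      = acc ++ pvDedup (L.filter (fun z => !acc.contains z)) := by
  induction hn : L.length using Nat.strong_induction_on generalizing L acc with
  | _ n ih =>
  cases L with
  | nil => simp [pvDedup_nil]
  | cons u L =>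
    subst hn
    rw [List.foldl_cons]
    by_cases hu : u ∈ acc
    · rw [if_pos hu, ih L.length (by simp) L acc rfl]
      have h1 : (u :: L).filter (fun z => !acc.contains z) = L.filter (fun z => !acc.contains z) := by
        rw [List.filter_cons]; simp [hu]
      rw [h1]
    · rw [if_neg hu, ih L.length (by simp) L (acc ++ [u]) rfl]
      have h1 : (u :: L).filter (fun z => !acc.contains z)
          = u :: L.filter (fun z => !acc.contains z) := by
        rw [List.filter_cons]; simp [hu]
      rw [h1, pvDedup_cons]
      have hf : L.filter (fun z => !(acc ++ [u]).contains z)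
          = (L.filter (fun z => !acc.contains z)).filter (fun z => z ≠ u) := by
        rw [List.filter_filter]
        apply List.filter_congr
        intro z _
        by_cases hz : z = u <;> simp [hz, hu]
      rw [hf]
      simp

-- the keep-filter/value-map core commutes with B's duplicate elimination
lemma pv_MF_filter (l : List (Bool × String)) (u : String) :
    ((l.filter (fun q => q.2 ≠ u)).filter (fun q => q.1)).map (fun q => q.2)
      = ((l.filter (fun q => q.1)).map (fun q => q.2)).filter (fun z => z ≠ u) := by
  rw [List.filter_filter, List.filter_map, List.filter_filter]
  congr 1
  apply List.filter_congr
  intro q _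
  simp [Function.comp, Bool.and_comm]

-- B's loop computes pvDedup of the kept values, appended to the result so far
lemma pv_bloop (w : List (Bool × String)) (res : List String) :
    pvBLoop w res
      = res ++ pvDedup ((w.filter (fun q => q.1)).map (fun q => q.2)) := by
  induction hn : w.length using Nat.strong_induction_on generalizing w res with
  | _ n ih =>
  cases w with
  | nil => rw [pvBLoop]; simp [pvDedup_nil]
  | cons p w =>
    subst hn
    rw [pvBLoop]
    by_cases hp : p.1 = true
    · rw [if_pos hp]
      have hlt : (w.filter (fun q => q.2 ≠ p.2)).length < (p :: w).length := by
        simp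
        exact le_trans (List.length_filter_le _ _) (by simp)
      rw [ih _ hlt _ _ rfl, pv_MF_filter]
      have hc : (p :: w).filter (fun q => q.1) = p :: w.filter (fun q => q.1) := by
        rw [List.filter_cons, hp]; rfl
      rw [hc, List.map_cons, pvDedup_cons]
      simp
    · rw [if_neg hp, ih w.length (by simp) w res rfl]
      have hc : (p :: w).filter (fun q => q.1) = w.filter (fun q => q.1) := by
        rw [List.filter_cons, Bool.of_not_eq_true hp]; rfl
      rw [hc]

-- the precomputed worklist's kept values are A's mapped-filtered list
lemma pv_work_eq (elements : List String) :
    (((elements.map (fun x => (decide (5 ≤ PySem.Str.len x), PySem.Str.upper x))).filter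
        (fun q => q.1)).map (fun q => q.2))
      = (elements.filter (fun x => 5 ≤ PySem.Str.len x)).map (fun y => PySem.Str.upper y) := by
  rw [List.filter_map, List.map_map]
  rfl

-- ===== VERDICT (by name: the statement is the Claim_ definition above) =====
theorem elements_of_freedom_spec : Claim_equal_elements_of_freedom := by
  intro elements _
  unfold Spec_elements_of_freedom elements_of_freedom elements_of_freedom_alt
  by_cases he : elements = []
  · subst he; rw [List.map_nil, pvBLoop]; rfl
  · simp only [he, if_false]
    rw [pv_foldl_dedup, pv_bloop, pv_work_eq]
    simp
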